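-- pv_equiv track=rewrite | github.com/amrithajayadev/misc | seq2.py | missingDigits
-- ===== SOURCE A (Python) =====
-- from collections import deque
--
-- def missingDigits(config, x, y):
--     # Write your code here
--     """
--     1. Convert the config to array of integers
--     2. cur = 0
--     3. Use a decision tree bfs to find a number that satisfies the config
--     """
--     def reachable_digits(x, y):
--         visited = set()
--         q = deque([x, y])
--         while q:
--             d = q.popleft()
--             if d in visited:
--                 continue
--             visited.add(d)
--             q.append((d+x)%10)
--             q.append((d + y) % 10)
--         return visited
--
--
--     n = len(config)
--     s = list(map(int, config))
--     reach = reachable_digits(x, y)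
--
--     for digit in s:
--         if digit not in reach:
--             return None
--
--     q = deque()
--     visited = set()
--
--     parent = {}
--     digit_added = {}
--
--     for a in [x, y]:
--         digit = a % 10
--         matched = 1 if digit == s[0] else 0
--         state = (digit, matched)
--         q.append(state)
--         visited.add(state)
--
--         parent[state] = None
--         digit_added[state] = digit
--
--     while q:
--         digit, matched = q.popleft()
--         if matched == n:
--             result = []
--             state = (digit, matched)
--
--             while state:
--                 result.append(str(digit_added[state]))
--                 state = parent[state]
--             return "".join(result[::-1])
--
--         for a in [x, y]:
--             next_digit = (digit + a) % 10
--             next_matched = matched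
--
--             if matched < n and next_digit == s[matched]:
--                 next_matched += 1
--
--             state = (next_digit, next_matched)
--             if state not in visited:
--                 visited.add(state)
--                 parent[state] = (digit, matched)
--                 digit_added[state] = next_digit
--                 q.append(state)
--
--     return "-1"
-- ===== SOURCE B (Python) =====
-- from collections import deque
--
-- def missingDigits(config, x, y):
--     # Same precheck; second BFS rewritten to carry the path string in each
--     # queue element instead of reconstructing it from parent/digit_added dicts.
--     def reachable_digits(x, y):
--         visited = set()
--         q = deque([x, y])
--         while q:
--             d = q.popleft()
--             if d in visited:
--                 continue
--             visited.add(d)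
--             q.append((d + x) % 10)
--             q.append((d + y) % 10)
--         return visited
--
--     n = len(config)
--     s = list(map(int, config))
--     reach = reachable_digits(x, y)
--
--     for digit in s:
--         if digit not in reach:
--             return None
--
--     q = deque()
--     visited = set()
--     for a in [x, y]:
--         digit = a % 10
--         matched = 1 if digit == s[0] else 0
--         q.append((digit, matched, str(digit)))
--         visited.add((digit, matched))
--
--     while q:
--         digit, matched, path = q.popleft()
--         if matched == n:
--             return path
--         for a in [x, y]:
--             next_digit = (digit + a) % 10
--             next_matched = matched
--             if matched < n and next_digit == s[matched]:
--                 next_matched += 1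
--             if (next_digit, next_matched) not in visited:
--                 visited.add((next_digit, next_matched))
--                 q.append((next_digit, next_matched, path + str(next_digit)))
--
--     return "-1"
-- ===== Notes on version B (the rewrite author's own statement) =====
-- stated objective: simpler
-- what changed: The second BFS carries each state's path string in the queue element (digit, matched, path) and returns it directly on a full match, removing the parent/digit_added dictionaries and the backwards path-reconstruction loop; the frontier, branching order and visited discipline are unchanged.
import Mathlib
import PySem

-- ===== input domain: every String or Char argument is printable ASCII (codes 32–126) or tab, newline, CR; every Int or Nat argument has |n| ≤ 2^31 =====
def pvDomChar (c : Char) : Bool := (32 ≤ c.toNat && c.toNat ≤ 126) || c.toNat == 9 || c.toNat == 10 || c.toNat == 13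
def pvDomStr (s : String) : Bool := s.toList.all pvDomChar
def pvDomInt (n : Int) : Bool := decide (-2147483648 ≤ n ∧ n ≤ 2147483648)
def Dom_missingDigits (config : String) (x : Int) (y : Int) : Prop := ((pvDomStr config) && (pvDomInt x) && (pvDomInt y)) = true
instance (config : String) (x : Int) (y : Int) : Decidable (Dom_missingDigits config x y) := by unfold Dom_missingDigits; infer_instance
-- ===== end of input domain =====

-- B rewrites the second BFS to carry (digit, matched, path) in the queue instead of
-- reconstructing the answer from parent/digit_added dictionaries; return value only.

-- ===== PORT A =====
-- shared helpers (this code is textually identical in both Pythons)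

-- s = list(map(int, config))  (int(c); under Pre_ every c is a digit)
def pvDigitsOf (config : String) : List Int :=
  config.toList.map (fun c => (PySem.Int.ofStr? (String.ofList [c])).getD 0)

-- reachable_digits: BFS over digits; fuel 30 bounds the ≤ 26 possible pops
def pvReachLoop (x y : Int) : Nat → List Int → PySem.Set Int → PySem.Set Int
  | 0, _, visited => visited
  | _ + 1, [], visited => visited
  | f + 1, d :: q, visited =>
    if PySem.Set.contains visited d then pvReachLoop x y f q visited
    else pvReachLoop x y f (q ++ [PySem.Int.mod (d + x) 10, PySem.Int.mod (d + y) 10])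
           (PySem.Set.add visited d)

def pvReachableDigits (x y : Int) : PySem.Set Int := pvReachLoop x y 30 [x, y] PySem.Set.empty

-- next_matched, shared expression of both step bodies
def pvNextMatched (n : Int) (s : List Int) (matched nd : Int) : Int :=
  if matched < n ∧ PySem.List.pyGet? s matched = some nd then matched + 1 else matched

-- A's state: (queue, visited, parent, digit_added)
def pvStepA (x y n : Int) (s : List Int) (cur : Int × Int)
    (acc : List (Int × Int) × PySem.Set (Int × Int) ×
           PySem.Dict (Int × Int) (Option (Int × Int)) × PySem.Dict (Int × Int) Int)
    (a : Int) :
    List (Int × Int) × PySem.Set (Int × Int) ×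
    PySem.Dict (Int × Int) (Option (Int × Int)) × PySem.Dict (Int × Int) Int :=
  let (q, visited, parent, dadd) := acc
  let nd := PySem.Int.mod (cur.1 + a) 10
  let nm := pvNextMatched n s cur.2 nd
  if PySem.Set.contains visited (nd, nm) then acc
  else (q ++ [(nd, nm)], PySem.Set.add visited (nd, nm),
        parent.insert (nd, nm) (some cur), dadd.insert (nd, nm) nd)

-- result = []; while state: result.append(str(digit_added[state])); state = parent[state]
-- (fuel = number of parent entries + 1 bounds the chain length)
def pvRecon (parent : PySem.Dict (Int × Int) (Option (Int × Int)))
    (dadd : PySem.Dict (Int × Int) Int) :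
    Nat → Option (Int × Int) → List String → List String
  | 0, _, res => res
  | _ + 1, none, res => res
  | f + 1, some st, res =>
      pvRecon parent dadd f (parent.getD st none) (res ++ [PySem.Int.toStr (dadd.getD st 0)])

def pvLoopA (x y n : Int) (s : List Int) :
    Nat → List (Int × Int) → PySem.Set (Int × Int) →
    PySem.Dict (Int × Int) (Option (Int × Int)) → PySem.Dict (Int × Int) Int → Option String
  | 0, _, _, _, _ => some "-1"
  | _ + 1, [], _, _, _ => some "-1"
  | f + 1, st :: q, visited, parent, dadd =>
    if st.2 = n then
      some (PySem.Str.join "" ((pvRecon parent dadd (parent.keys.length + 1) (some st) []).reverse))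
    else
      match [x, y].foldl (pvStepA x y n s st) (q, visited, parent, dadd) with
      | (q', v', p', d') => pvLoopA x y n s f q' v' p' d'

-- for a in [x, y]: seed queue/visited/parent/digit_added
def pvInitA (x y : Int) (s : List Int) :
    List (Int × Int) × PySem.Set (Int × Int) ×
    PySem.Dict (Int × Int) (Option (Int × Int)) × PySem.Dict (Int × Int) Int :=
  [x, y].foldl
    (fun acc a =>
      let (q, visited, parent, dadd) := acc
      let digit := PySem.Int.mod a 10
      let matched : Int := if PySem.List.pyGet? s 0 = some digit then 1 else 0
      (q ++ [(digit, matched)], PySem.Set.add visited (digit, matched),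
       parent.insert (digit, matched) none, dadd.insert (digit, matched) digit))
    ([], PySem.Set.empty, PySem.Dict.empty, PySem.Dict.empty)

def missingDigits (config : String) (x : Int) (y : Int) : Option String :=
  let n : Int := (config.toList.length : Int)
  let s := pvDigitsOf config
  let reach := pvReachableDigits x y
  if s.any (fun d => !(PySem.Set.contains reach d)) then none
  else
    match pvInitA x y s with
    | (q, visited, parent, dadd) =>
        pvLoopA x y n s (10 * (s.length + 1) + 2) q visited parent dadd

-- ===== PORT B =====
-- B's queue carries (digit, matched, path); visited is keyed on (digit, matched)
def pvStepB (x y n : Int) (s : List Int) (cur : Int × Int) (path : String)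
    (acc : List (Int × Int × String) × PySem.Set (Int × Int)) (a : Int) :
    List (Int × Int × String) × PySem.Set (Int × Int) :=
  let (q, visited) := acc
  let nd := PySem.Int.mod (cur.1 + a) 10
  let nm := pvNextMatched n s cur.2 nd
  if PySem.Set.contains visited (nd, nm) then acc
  else (q ++ [(nd, nm, path ++ PySem.Int.toStr nd)], PySem.Set.add visited (nd, nm))

def pvLoopB (x y n : Int) (s : List Int) :
    Nat → List (Int × Int × String) → PySem.Set (Int × Int) → Option String
  | 0, _, _ => some "-1"
  | _ + 1, [], _ => some "-1"
  | f + 1, (digit, matched, path) :: q, visited =>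
    if matched = n then some path
    else
      match [x, y].foldl (pvStepB x y n s (digit, matched) path) (q, visited) with
      | (q', v') => pvLoopB x y n s f q' v'

def pvInitB (x y : Int) (s : List Int) :
    List (Int × Int × String) × PySem.Set (Int × Int) :=
  [x, y].foldl
    (fun acc a =>
      let digit := PySem.Int.mod a 10
      let matched : Int := if PySem.List.pyGet? s 0 = some digit then 1 else 0
      (acc.1 ++ [(digit, matched, PySem.Int.toStr digit)],
       PySem.Set.add acc.2 (digit, matched)))
    ([], PySem.Set.empty)

def missingDigits_alt (config : String) (x : Int) (y : Int) : Option String :=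
  let n : Int := (config.toList.length : Int)
  let s := pvDigitsOf config
  let reach := pvReachableDigits x y
  if s.any (fun d => !(PySem.Set.contains reach d)) then none
  else
    match pvInitB x y s with
    | (q, visited) => pvLoopB x y n s (10 * (s.length + 1) + 2) q visited

-- ===== PRECONDITION & SPEC =====
-- Pre_ excludes exactly the inputs where the Python A raises: a non-digit character
-- (ValueError from int(c)) or the empty config (IndexError at s[0]).
def Pre_missingDigits (config : String) (x : Int) (y : Int) : Prop :=
  config.toList ≠ [] ∧ config.toList.all Char.isDigit = true
instance (config : String) (x : Int) (y : Int) : Decidable (Pre_missingDigits config x y) := by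
  unfold Pre_missingDigits; infer_instance

def pvWitness_missingDigits : String × Int × Int := ("12", 3, 4)

def Spec_missingDigits (config : String) (x : Int) (y : Int) (out : Option String) : Prop := out = missingDigits_alt config x y
instance (config : String) (x : Int) (y : Int) (out : Option String) : Decidable (Spec_missingDigits config x y out) := by unfold Spec_missingDigits; infer_instance

-- ===== CLAIM (what is proved, stated in full; the proofs are below) =====
def Claim_equal_missingDigits : Prop := ∀ (config : String) (x : Int) (y : Int), Dom_missingDigits config x y → Pre_missingDigits config x y → Spec_missingDigits config x y (missingDigits config x y)

-- ===== LEMMAS AND PROOFS =====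

theorem chars_join_nil_flatten (l : List (List Char)) : PySem.Chars.join [] l = l.flatten := by
  match l with
  | [] => simp [PySem.Chars.join_nil]
  | [a] => simp [PySem.Chars.join_singleton]
  | a :: b :: t =>
      rw [PySem.Chars.join_cons_cons, chars_join_nil_flatten (b :: t)]
      simp

theorem str_join_append_singleton (dl : List String) (t : String) :
    PySem.Str.join "" (dl ++ [t]) = PySem.Str.join "" dl ++ t := by
  apply String.toList_inj.mp
  simp [PySem.Str.join, chars_join_nil_flatten]

-- keys of an L-indexed history
def pvKeyed (L : List ((Int × Int) × List String)) : List (Int × Int) := L.map Prod.fst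

-- the B-side path of a state, read off the history
def pvPathOf (L : List ((Int × Int) × List String)) (st : Int × Int) : String :=
  PySem.Str.join "" ((L.lookup st).getD [])

-- the coupling invariant between A's dictionaries and the history L
def pvInv (L : List ((Int × Int) × List String))
    (parent : PySem.Dict (Int × Int) (Option (Int × Int)))
    (dadd : PySem.Dict (Int × Int) Int)
    (visited : PySem.Set (Int × Int)) : Prop :=
  parent.keys = pvKeyed L ∧
  dadd.keys = pvKeyed L ∧
  visited = pvKeyed L ∧
  (pvKeyed L).Nodup ∧
  (∀ st st', parent.get? st = some (some st') → st' ∈ pvKeyed L) ∧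
  (∀ i, (h : i < L.length) → ∀ f, i < f → ∀ res,
      pvRecon parent dadd f (some (L[i].1)) res = res ++ (L[i].2).reverse)

theorem pvLookup_getElem (L : List ((Int × Int) × List String)) (i : Nat) (h : i < L.length)
    (hnd : (pvKeyed L).Nodup) : L.lookup (L[i].1) = some (L[i].2) := by
  induction L generalizing i with
  | nil => simp at h
  | cons e L ih =>
    match i with
    | 0 => simp [List.lookup]
    | j + 1 =>
      have hj : j < L.length := by simpa using h
      have hne : e.1 ≠ L[j].1 := by
        simp only [pvKeyed, List.map_cons, List.nodup_cons] at hnd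
        intro he
        exact hnd.1 (he ▸ List.mem_map_of_mem (l := L) (f := Prod.fst) (List.getElem_mem hj))
      have : (L[j].1 == e.1) = false := by
        simp; exact fun hx => hne hx.symm
      simp only [List.getElem_cons_succ, List.lookup, this]
      exact ih j hj (by simp only [pvKeyed, List.map_cons, List.nodup_cons] at hnd; exact hnd.2)

theorem pvLookup_append_left (L L' : List ((Int × Int) × List String)) (st : Int × Int)
    (h : st ∈ pvKeyed L) : (L ++ L').lookup st = L.lookup st := by
  induction L with
  | nil => simp [pvKeyed] at h
  | cons e L ih =>
    by_cases he : st = e.1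
    · simp [List.lookup, he]
    · have : (st == e.1) = false := by simp [he]
      simp only [List.cons_append, List.lookup, this]
      exact ih (by simpa [pvKeyed, he] using h)

theorem pvLookup_append_new (L : List ((Int × Int) × List String)) (st : Int × Int)
    (dl : List String) (h : st ∉ pvKeyed L) : (L ++ [(st, dl)]).lookup st = some dl := by
  induction L with
  | nil => simp
  | cons e L ih =>
    have hne : st ≠ e.1 := by intro hx; exact h (by simp [pvKeyed, hx])
    have : (st == e.1) = false := by simp [hne]
    simp only [List.cons_append, List.lookup, this]
    exact ih (fun hx => h (by simp [pvKeyed] at hx ⊢; right; exact hx))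

-- a fresh insertion does not change reconstruction from an old state
theorem pvRecon_none (parent : PySem.Dict (Int × Int) (Option (Int × Int)))
    (dadd : PySem.Dict (Int × Int) Int) (f : Nat) (res : List String) :
    pvRecon parent dadd f none res = res := by
  cases f <;> rfl

theorem pvRecon_stable (parent : PySem.Dict (Int × Int) (Option (Int × Int)))
    (dadd : PySem.Dict (Int × Int) Int) (K : List (Int × Int))
    (_hp : parent.keys = K) (hv : ∀ st st', parent.get? st = some (some st') → st' ∈ K)
    (k : Int × Int) (hk : k ∉ K) (v : Option (Int × Int)) (w : Int)
    (f : Nat) (st : Int × Int) (hst : st ∈ K) (res : List String) :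
    pvRecon (parent.insert k v) (dadd.insert k w) f (some st) res =
      pvRecon parent dadd f (some st) res := by
  induction f generalizing st res with
  | zero => rfl
  | succ f ih =>
    have hne : st ≠ k := fun hx => hk (hx ▸ hst)
    have hgp : (parent.insert k v).getD st none = parent.getD st none := by
      rw [PySem.Dict.getD_insert]; simp [hne]
    have hgd : (dadd.insert k w).getD st 0 = dadd.getD st 0 := by
      rw [PySem.Dict.getD_insert]; simp [hne]
    simp only [pvRecon, hgp, hgd]
    rcases hq : parent.get? st with _ | ov
    · have hn : parent.getD st none = none := by
        rw [PySem.Dict.getD_eq_get?_getD, hq]; rfl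
      rw [hn, pvRecon_none, pvRecon_none]
    · have ho : parent.getD st none = ov := by
        rw [PySem.Dict.getD_eq_get?_getD, hq]; rfl
      rcases ov with _ | st'
      · rw [ho, pvRecon_none, pvRecon_none]
      · rw [ho]
        exact ih st' (hv st st' hq) _

theorem pvKeyed_append (L : List ((Int × Int) × List String)) (e : (Int × Int) × List String) :
    pvKeyed (L ++ [e]) = pvKeyed L ++ [e.1] := by simp [pvKeyed]

-- one matching step of the two BFS bodies
theorem pvStep_sim (x y n : Int) (s : List Int)
    (L : List ((Int × Int) × List String)) (parent : PySem.Dict (Int × Int) (Option (Int × Int)))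
    (dadd : PySem.Dict (Int × Int) Int) (visited : PySem.Set (Int × Int))
    (cur : Int × Int) (qA : List (Int × Int)) (a : Int)
    (hI : pvInv L parent dadd visited) (hcur : cur ∈ pvKeyed L)
    (hqA : ∀ st ∈ qA, st ∈ pvKeyed L) :
    ∃ L', (∀ st ∈ pvKeyed L, pvPathOf L' st = pvPathOf L st) ∧ cur ∈ pvKeyed L' ∧
      match pvStepA x y n s cur (qA, visited, parent, dadd) a,
            pvStepB x y n s cur (pvPathOf L cur) (qA.map (fun st => (st.1, st.2, pvPathOf L st)), visited) a with
      | (qA', v', p', d'), (qB', v'') =>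
          v'' = v' ∧ pvInv L' p' d' v' ∧ qB' = qA'.map (fun st => (st.1, st.2, pvPathOf L' st)) ∧
          ∀ st ∈ qA', st ∈ pvKeyed L' := by
  obtain ⟨hpk, hdk, hvis, hnd, hval, hrec⟩ := hI
  by_cases hc : PySem.Set.contains visited
      (PySem.Int.mod (cur.1 + a) 10, pvNextMatched n s cur.2 (PySem.Int.mod (cur.1 + a) 10)) = true
  · have hA : pvStepA x y n s cur (qA, visited, parent, dadd) a = (qA, visited, parent, dadd) := by
      dsimp only [pvStepA]
      rw [if_pos hc]
    have hB : pvStepB x y n s cur (pvPathOf L cur)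
        (qA.map (fun st => (st.1, st.2, pvPathOf L st)), visited) a =
        (qA.map (fun st => (st.1, st.2, pvPathOf L st)), visited) := by
      dsimp only [pvStepB]
      rw [if_pos hc]
    refine ⟨L, fun _ _ => rfl, hcur, ?_⟩
    rw [hA, hB]
    exact ⟨rfl, ⟨hpk, hdk, hvis, hnd, hval, hrec⟩, rfl, hqA⟩
  · -- a fresh state is enqueued on both sides
    rw [Bool.not_eq_true] at hc
    set nd := PySem.Int.mod (cur.1 + a) 10 with hnddef
    set nm := pvNextMatched n s cur.2 nd with hnmdef
    have hfresh : (nd, nm) ∉ pvKeyed L := by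
      intro hmem
      have : PySem.Set.contains visited (nd, nm) = true := by
        rw [PySem.Set.contains_eq_listContains]
        simpa [hvis] using hmem
      rw [hc] at this
      exact Bool.false_ne_true this
    obtain ⟨ecur, hecurL, hecur1⟩ := List.mem_map.mp hcur
    obtain ⟨j, hj, hej⟩ := List.getElem_of_mem hecurL
    have hcurj : (L[j]).1 = cur := by rw [hej, hecur1]
    have hlookcur : L.lookup cur = some (L[j].2) := by rw [← hcurj]; exact pvLookup_getElem L j hj hnd
    have hA : pvStepA x y n s cur (qA, visited, parent, dadd) a =
        (qA ++ [(nd, nm)], visited.add (nd, nm),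
         parent.insert (nd, nm) (some cur), dadd.insert (nd, nm) nd) := by
      dsimp only [pvStepA]
      rw [if_neg (by rw [hc]; exact Bool.false_ne_true)]
    have hB : pvStepB x y n s cur (pvPathOf L cur)
        (qA.map (fun st => (st.1, st.2, pvPathOf L st)), visited) a =
        (qA.map (fun st => (st.1, st.2, pvPathOf L st)) ++
           [(nd, nm, pvPathOf L cur ++ PySem.Int.toStr nd)], visited.add (nd, nm)) := by
      dsimp only [pvStepB]
      rw [if_neg (by rw [hc]; exact Bool.false_ne_true)]
    refine ⟨L ++ [((nd, nm), L[j].2 ++ [PySem.Int.toStr nd])], ?_, ?_, ?_⟩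
    · intro st hst
      unfold pvPathOf
      rw [pvLookup_append_left _ _ _ hst]
    · rw [pvKeyed_append]; exact List.mem_append_left _ hcur
    rw [hA, hB]
    have hpc : parent.contains (nd, nm) = false := by
      rw [Bool.eq_false_iff]
      intro h
      exact hfresh (by rw [← hpk]; exact (PySem.Dict.contains_iff_mem_keys parent (nd, nm)).mp h)
    have hdc : dadd.contains (nd, nm) = false := by
      rw [Bool.eq_false_iff]
      intro h
      exact hfresh (by rw [← hdk]; exact (PySem.Dict.contains_iff_mem_keys dadd (nd, nm)).mp h)
    have hvisfresh : (nd, nm) ∉ visited := by rw [hvis]; exact hfresh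
    refine ⟨rfl, ⟨?_, ?_, ?_, ?_, ?_, ?_⟩, ?_, ?_⟩
    · rw [PySem.Dict.keys_insert_of_not_contains parent _ hpc, hpk, pvKeyed_append]
    · rw [PySem.Dict.keys_insert_of_not_contains dadd _ hdc, hdk, pvKeyed_append]
    · rw [PySem.Set.add_of_not_mem hvisfresh, hvis, pvKeyed_append]
    · rw [pvKeyed_append]
      have hdisj : (pvKeyed L).Disjoint [(nd, nm)] := by
        rw [List.disjoint_singleton]; exact hfresh
      exact hnd.append (List.nodup_singleton _) hdisj
    · intro st st' h
      rw [PySem.Dict.get?_insert] at h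
      rw [pvKeyed_append]
      split at h
      · cases h with | refl => exact List.mem_append_left _ hcur
      · exact List.mem_append_left _ (hval st st' h)
    · intro i hi f hf res
      rw [List.length_append, List.length_singleton] at hi
      by_cases hiL : i < L.length
      · rw [List.getElem_append_left hiL]
        rw [pvRecon_stable parent dadd (pvKeyed L) hpk hval (nd, nm) hfresh _ _ f (L[i].1)
            (List.mem_map_of_mem (List.getElem_mem hiL)) res]
        exact hrec i hiL f hf res
      · have hiEq : i = L.length := by omega
        subst hiEq
        rw [List.getElem_append_right (by omega)]
        simp only [Nat.sub_self, List.getElem_singleton]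
        match f, hf with
        | f + 1, hf =>
          simp only [pvRecon]
          have h1 : (dadd.insert (nd, nm) nd).getD (nd, nm) 0 = nd := by
            rw [PySem.Dict.getD_insert]; simp
          have h2 : (parent.insert (nd, nm) (some cur)).getD (nd, nm) none = some cur := by
            rw [PySem.Dict.getD_insert]; simp
          rw [h1, h2]
          rw [pvRecon_stable parent dadd (pvKeyed L) hpk hval (nd, nm) hfresh _ _ f cur hcur]
          rw [← hcurj, hrec j hj f (by omega)]
          simp
    · rw [List.map_append]
      congr 1
      · apply List.map_congr_left
        intro st hst
        unfold pvPathOf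
        rw [pvLookup_append_left _ _ _ (hqA st hst)]
      · simp only [List.map_cons, List.map_nil]
        have hnew : pvPathOf (L ++ [((nd, nm), L[j].2 ++ [PySem.Int.toStr nd])]) (nd, nm) =
            pvPathOf L cur ++ PySem.Int.toStr nd := by
          unfold pvPathOf
          rw [pvLookup_append_new _ _ _ hfresh, hlookcur]
          simp only [Option.getD_some]
          exact str_join_append_singleton _ _
        rw [hnew]
    · intro st hst
      rw [pvKeyed_append]
      rcases List.mem_append.mp hst with h | h
      · exact List.mem_append_left _ (hqA st h)
      · simp only [List.mem_singleton] at h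
        subst h
        exact List.mem_append_right _ (List.mem_singleton_self _)

theorem str_join_single (t : String) : PySem.Str.join "" [t] = t := by
  apply String.toList_inj.mp
  simp [PySem.Str.join]

-- the loops stay in lock-step
theorem pvLoop_sim (x y n : Int) (s : List Int) (f : Nat) :
    ∀ (L : List ((Int × Int) × List String)) parent dadd visited qA,
      pvInv L parent dadd visited → (∀ st ∈ qA, st ∈ pvKeyed L) →
      pvLoopA x y n s f qA visited parent dadd =
        pvLoopB x y n s f (qA.map (fun st => (st.1, st.2, pvPathOf L st))) visited := by
  induction f with
  | zero => intro L parent dadd visited qA _ _; rfl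
  | succ f ih =>
    intro L parent dadd visited qA hI hqA
    match qA with
    | [] => rfl
    | st :: q =>
      simp only [List.map_cons, pvLoopA, pvLoopB]
      by_cases hm : st.2 = n
      · -- both return the stored / reconstructed path
        rw [if_pos hm, if_pos hm]
        obtain ⟨e, heL, heq⟩ := List.mem_map.mp (hqA st (List.mem_cons_self))
        obtain ⟨i, hi, hei⟩ := List.getElem_of_mem heL
        have hfuel : i < parent.keys.length + 1 := by
          rw [hI.1]; unfold pvKeyed; rw [List.length_map]; omega
        have hrec := hI.2.2.2.2.2 i hi (parent.keys.length + 1) hfuel []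
        have hst : st = (L[i]).1 := by rw [hei, heq]
        rw [← hst] at hrec
        rw [hrec]
        have hlook : L.lookup st = some (L[i].2) := by
          rw [hst]; exact pvLookup_getElem L i hi hI.2.2.2.1
        simp only [pvPathOf, hlook, Option.getD_some, List.nil_append, List.reverse_reverse]
      · simp only [hm, if_false]
        have hstL : st ∈ pvKeyed L := hqA st (List.mem_cons_self)
        have hq' : ∀ st' ∈ q, st' ∈ pvKeyed L := fun st' h => hqA st' (List.mem_cons_of_mem _ h)
        obtain ⟨L1, hpath1, hcur1, h1⟩ := pvStep_sim x y n s L parent dadd visited st q x hI hstL hq'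
        rcases hA1 : pvStepA x y n s st (q, visited, parent, dadd) x with ⟨q1, v1, p1, d1⟩
        rcases hB1 : pvStepB x y n s st (pvPathOf L st)
            (q.map (fun st => (st.1, st.2, pvPathOf L st)), visited) x with ⟨qb1, v1'⟩
        rw [hA1, hB1] at h1
        obtain ⟨hv1, hI1, hqb1, hmem1⟩ := h1
        obtain ⟨L2, hpath2, _hcur2, h2⟩ := pvStep_sim x y n s L1 p1 d1 v1 st q1 y hI1 hcur1 hmem1
        rcases hA2 : pvStepA x y n s st (q1, v1, p1, d1) y with ⟨q2, v2, p2, d2⟩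
        rcases hB2 : pvStepB x y n s st (pvPathOf L1 st)
            (q1.map (fun st => (st.1, st.2, pvPathOf L1 st)), v1) y with ⟨qb2, v2'⟩
        rw [hA2, hB2] at h2
        obtain ⟨hv2, hI2, hqb2, hmem2⟩ := h2
        have hfoldA : [x, y].foldl (pvStepA x y n s st) (q, visited, parent, dadd) = (q2, v2, p2, d2) := by
          simp only [List.foldl_cons, List.foldl_nil, hA1, hA2]
        have hfoldB : [x, y].foldl (pvStepB x y n s st (pvPathOf L st))
            (q.map (fun st => (st.1, st.2, pvPathOf L st)), visited) = (qb2, v2') := by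
          simp only [List.foldl_cons, List.foldl_nil, hB1, hqb1, hv1]
          rw [← hpath1 st hstL]
          exact hB2
        rw [hfoldA, hfoldB]
        rw [hv2, hqb2]
        exact ih L2 p2 d2 v2 q2 hI2 hmem2

theorem pvInit_sim (x y : Int) (s : List Int) :
    ∃ L, match pvInitA x y s, pvInitB x y s with
      | (qA, vA, parent, dadd), (qB, vB) =>
          vB = vA ∧ pvInv L parent dadd vA ∧
          qB = qA.map (fun st => (st.1, st.2, pvPathOf L st)) ∧ ∀ st ∈ qA, st ∈ pvKeyed L := by
  set d1 := PySem.Int.mod x 10 with hd1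
  set m1 : Int := if PySem.List.pyGet? s 0 = some d1 then 1 else 0 with hm1
  set d2 := PySem.Int.mod y 10 with hd2
  set m2 : Int := if PySem.List.pyGet? s 0 = some d2 then 1 else 0 with hm2
  have hA : pvInitA x y s =
      ([(d1, m1), (d2, m2)],
       PySem.Set.add (PySem.Set.add PySem.Set.empty (d1, m1)) (d2, m2),
       (PySem.Dict.empty.insert (d1, m1) none).insert (d2, m2) none,
       (PySem.Dict.empty.insert (d1, m1) d1).insert (d2, m2) d2) := rfl
  have hB : pvInitB x y s =
      ([(d1, m1, PySem.Int.toStr d1), (d2, m2, PySem.Int.toStr d2)],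
       PySem.Set.add (PySem.Set.add PySem.Set.empty (d1, m1)) (d2, m2)) := rfl
  have hadd1 : PySem.Set.add PySem.Set.empty (d1, m1) = [(d1, m1)] :=
    PySem.Set.add_of_not_mem (by simp [PySem.Set.empty])
  by_cases he : ((d2, m2) : Int × Int) = (d1, m1)
  · -- x and y seed the same state: the second insertion overwrites the first
    have hd21 : d2 = d1 := by simpa using congrArg Prod.fst he
    have hm21 : m2 = m1 := by simpa using congrArg Prod.snd he
    refine ⟨[((d1, m1), [PySem.Int.toStr d1])], ?_⟩
    rw [hA, hB]
    dsimp only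
    simp only [hd21, hm21]
    have hvis : PySem.Set.add (PySem.Set.add PySem.Set.empty (d1, m1)) (d1, m1) = [(d1, m1)] := by
      rw [hadd1]
      exact PySem.Set.add_of_mem (List.mem_singleton_self _)
    have hkp : ((PySem.Dict.empty.insert (d1, m1) none).insert (d1, m1)
        (none : Option (Int × Int))).keys = [(d1, m1)] := by
      rw [PySem.Dict.keys_insert_of_contains _ _ (PySem.Dict.contains_insert_self _ _ _),
          PySem.Dict.keys_insert_of_not_contains _ _ (by simp [PySem.Dict.contains_empty])]
      simp [PySem.Dict.keys_empty]
    have hkd : ((PySem.Dict.empty.insert (d1, m1) d1).insert (d1, m1) d1).keys = [(d1, m1)] := by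
      rw [PySem.Dict.keys_insert_of_contains _ _ (PySem.Dict.contains_insert_self _ _ _),
          PySem.Dict.keys_insert_of_not_contains _ _ (by simp [PySem.Dict.contains_empty])]
      simp [PySem.Dict.keys_empty]
    refine ⟨trivial, ⟨?_, ?_, ?_, ?_, ?_, ?_⟩, ?_, ?_⟩
    · simpa [pvKeyed] using hkp
    · simpa [pvKeyed] using hkd
    · simp [pvKeyed]
    · simp [pvKeyed]
    · intro st st' h
      rw [PySem.Dict.get?_insert, PySem.Dict.get?_insert] at h
      split at h
      · simp at h
      · rw [PySem.Dict.get?_empty] at h; simp at h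
    · intro i hi f hf res
      simp only [List.length_singleton] at hi
      have hi0 : i = 0 := by omega
      subst hi0
      match f, hf with
      | f + 1, _ =>
        simp only [List.getElem_singleton, pvRecon]
        have hgd : ((PySem.Dict.empty.insert (d1, m1) d1).insert (d1, m1) d1).getD (d1, m1) 0 = d1 := by
          rw [PySem.Dict.getD_insert]; simp
        have hgp : ((PySem.Dict.empty.insert (d1, m1) none).insert (d1, m1)
            (none : Option (Int × Int))).getD (d1, m1) none = none := by
          rw [PySem.Dict.getD_insert]; simp
        rw [hgd, hgp, pvRecon_none]
        simp
    · have hpath : pvPathOf [((d1, m1), [PySem.Int.toStr d1])] (d1, m1) = PySem.Int.toStr d1 := by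
        unfold pvPathOf
        simp [List.lookup, str_join_single]
      simp only [List.map_cons, List.map_nil, hpath]
    · intro st hst
      rcases List.mem_cons.mp hst with h | h
      · subst h; simp [pvKeyed]
      · simp only [List.mem_singleton] at h; subst h; simp [pvKeyed]
  · -- two distinct seed states
    refine ⟨[((d1, m1), [PySem.Int.toStr d1]), ((d2, m2), [PySem.Int.toStr d2])], ?_⟩
    rw [hA, hB]
    have hvis : PySem.Set.add (PySem.Set.add PySem.Set.empty (d1, m1)) (d2, m2) =
        [(d1, m1), (d2, m2)] := by
      rw [hadd1, PySem.Set.add_of_not_mem (by simpa using he)]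
      rfl
    have hc1 : (PySem.Dict.empty (κ := Int × Int) (ν := Option (Int × Int))).contains (d1, m1) = false := by
      simp [PySem.Dict.contains_empty]
    have hc1' : (PySem.Dict.empty (κ := Int × Int) (ν := Int)).contains (d1, m1) = false := by
      simp [PySem.Dict.contains_empty]
    have hc2 : (PySem.Dict.empty.insert (d1, m1) (none : Option (Int × Int))).contains (d2, m2) = false := by
      rw [PySem.Dict.contains_insert]
      simp [PySem.Dict.contains_empty, he]
    have hc2' : (PySem.Dict.empty.insert (d1, m1) d1).contains (d2, m2) = false := by
      rw [PySem.Dict.contains_insert]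
      simp [PySem.Dict.contains_empty, he]
    have hkp : ((PySem.Dict.empty.insert (d1, m1) none).insert (d2, m2)
        (none : Option (Int × Int))).keys = [(d1, m1), (d2, m2)] := by
      rw [PySem.Dict.keys_insert_of_not_contains _ _ hc2,
          PySem.Dict.keys_insert_of_not_contains _ _ hc1]
      simp [PySem.Dict.keys_empty]
    have hkd : ((PySem.Dict.empty.insert (d1, m1) d1).insert (d2, m2) d2).keys =
        [(d1, m1), (d2, m2)] := by
      rw [PySem.Dict.keys_insert_of_not_contains _ _ hc2',
          PySem.Dict.keys_insert_of_not_contains _ _ hc1']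
      simp [PySem.Dict.keys_empty]
    refine ⟨rfl, ⟨?_, ?_, ?_, ?_, ?_, ?_⟩, ?_, ?_⟩
    · simpa [pvKeyed] using hkp
    · simpa [pvKeyed] using hkd
    · simpa [pvKeyed] using hvis
    · simp only [pvKeyed, List.map_cons, List.map_nil]
      refine List.nodup_cons.mpr ⟨?_, List.nodup_singleton _⟩
      simp only [List.mem_singleton]
      exact fun h => he h.symm
    · intro st st' h
      rw [PySem.Dict.get?_insert, PySem.Dict.get?_insert] at h
      split at h
      · simp at h
      · split at h
        · simp at h
        · rw [PySem.Dict.get?_empty] at h; simp at h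
    · intro i hi f hf res
      simp only [List.length_cons] at hi
      have hgd1 : ((PySem.Dict.empty.insert (d1, m1) d1).insert (d2, m2) d2).getD (d1, m1) 0 = d1 := by
        rw [PySem.Dict.getD_insert, PySem.Dict.getD_insert]
        simp [Ne.symm he]
      have hgp1 : ((PySem.Dict.empty.insert (d1, m1) none).insert (d2, m2)
          (none : Option (Int × Int))).getD (d1, m1) none = none := by
        rw [PySem.Dict.getD_insert, PySem.Dict.getD_insert]
        simp [Ne.symm he]
      have hgd2 : ((PySem.Dict.empty.insert (d1, m1) d1).insert (d2, m2) d2).getD (d2, m2) 0 = d2 := by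
        rw [PySem.Dict.getD_insert]
        simp
      have hgp2 : ((PySem.Dict.empty.insert (d1, m1) none).insert (d2, m2)
          (none : Option (Int × Int))).getD (d2, m2) none = none := by
        rw [PySem.Dict.getD_insert]
        simp
      match i, hi with
      | 0, _ =>
        match f, hf with
        | f + 1, _ =>
          simp only [List.getElem_cons_zero, pvRecon]
          rw [hgd1, hgp1, pvRecon_none]
          simp
      | 1, _ =>
        match f, hf with
        | f + 1, _ =>
          simp only [List.getElem_cons_succ, List.getElem_cons_zero, pvRecon]
          rw [hgd2, hgp2, pvRecon_none]
          simp
    · have hpath1 : pvPathOf [((d1, m1), [PySem.Int.toStr d1]), ((d2, m2), [PySem.Int.toStr d2])]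
          (d1, m1) = PySem.Int.toStr d1 := by
        unfold pvPathOf
        simp [List.lookup, str_join_single]
      have hpath2 : pvPathOf [((d1, m1), [PySem.Int.toStr d1]), ((d2, m2), [PySem.Int.toStr d2])]
          (d2, m2) = PySem.Int.toStr d2 := by
        unfold pvPathOf
        have : (((d2, m2) : Int × Int) == (d1, m1)) = false := by simp [he]
        simp [List.lookup, this, str_join_single]
      simp only [List.map_cons, List.map_nil, hpath1, hpath2]
    · intro st hst
      rcases List.mem_cons.mp hst with h | h
      · subst h; simp [pvKeyed]
      · simp only [List.mem_singleton] at h; subst h; simp [pvKeyed]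

-- ===== VERDICT (by name: the statement is the Claim_ definition above) =====
theorem missingDigits_spec : Claim_equal_missingDigits := by
  intro config x y _ _
  unfold Spec_missingDigits missingDigits missingDigits_alt
  rcases hA : pvInitA x y (pvDigitsOf config) with ⟨qA, vA, parent, dadd⟩
  rcases hB : pvInitB x y (pvDigitsOf config) with ⟨qB, vB⟩
  obtain ⟨L, hL⟩ := pvInit_sim x y (pvDigitsOf config)
  rw [hA, hB] at hL
  obtain ⟨hv, hI, hq, hmem⟩ := hL
  dsimp only
  rw [hA, hB]
  dsimp only
  subst hv hq
  split
  · rfl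
  · exact pvLoop_sim _ _ _ _ _ L parent dadd _ qA hI hmem
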